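-- pv_equiv track=rewrite | github.com/Parow01/Parow01 | umaralertbot/alert_engine/alert_core.py | filter_clean_alerts
-- ===== SOURCE A (Python) =====
-- from typing import List, Dict
--
-- def filter_clean_alerts(alerts: List[Dict]) -> List[Dict]:
--     """
--     Applies confidence threshold and prevents duplicate spam.
--     """
--     final_alerts = []
--     seen_signatures = set()
--
--     for alert in alerts:
--         key = alert.get("type", "") + alert.get("alert", "")
--         if key in seen_signatures:
--             continue
--         seen_signatures.add(key)
--
--         # Basic filter: Allow only high or medium alerts, avoid low confidence
--         if alert.get("confidence", "medium") in ["high", "medium"]: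
--             final_alerts.append(alert)
--
--     return final_alerts
-- ===== SOURCE B (Python) =====
-- def filter_clean_alerts(alerts):
--     out = []
--     rest = list(alerts)
--     while rest:
--         head = rest[0]
--         key = head.get("type", "") + head.get("alert", "")
--         if head.get("confidence", "medium") in ("high", "medium"):
--             out.append(head)
--         # eliminate every later alert with the same signature, then continue
--         rest = [a for a in rest[1:]
--                 if a.get("type", "") + a.get("alert", "") != key]
--     return out
-- ===== Notes on version B (the rewrite author's own statement) =====
-- stated objective: alternative
-- what changed: Replaces the seen-set bookkeeping by a selection-style elimination loop: repeatedly take the head alert, emit it if its confidence passes, and delete every later alert sharing its signature from the remaining list, so no seen set or dict exists at all.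
import Mathlib
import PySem

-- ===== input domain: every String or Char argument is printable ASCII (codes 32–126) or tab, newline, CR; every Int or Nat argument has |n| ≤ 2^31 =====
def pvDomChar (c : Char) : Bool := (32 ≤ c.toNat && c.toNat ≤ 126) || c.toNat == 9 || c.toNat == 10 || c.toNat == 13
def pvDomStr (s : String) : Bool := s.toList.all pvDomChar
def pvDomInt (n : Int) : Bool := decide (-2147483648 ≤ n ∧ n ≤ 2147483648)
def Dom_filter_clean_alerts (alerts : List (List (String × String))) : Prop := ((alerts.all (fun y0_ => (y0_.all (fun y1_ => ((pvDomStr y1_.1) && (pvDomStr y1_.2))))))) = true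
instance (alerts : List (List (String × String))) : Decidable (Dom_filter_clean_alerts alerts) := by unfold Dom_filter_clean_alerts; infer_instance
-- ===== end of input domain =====

-- B replaces the seen-set loop by a selection-style elimination loop (take the head, drop all later alerts with its signature); same results, no speed claim.

-- shared helpers: alert.get(k, dflt) on the alert dict, the dedup key, and the confidence test
def pvGet (a : List (String × String)) (k dflt : String) : String :=
  (PySem.Dict.mk a).getD k dflt

def pvKey (a : List (String × String)) : String :=
  pvGet a "type" "" ++ pvGet a "alert" ""

def pvGood (a : List (String × String)) : Bool :=
  pvGet a "confidence" "medium" == "high" || pvGet a "confidence" "medium" == "medium"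

-- ===== PORT A =====
-- the body of A's single for-loop (seen-set check, then conditional append)
def pvStepA (st : List (List (String × String)) × PySem.Set String)
    (alert : List (String × String)) : List (List (String × String)) × PySem.Set String :=
  let key := pvKey alert
  if PySem.Set.contains st.2 key then st
  else
    let seen := PySem.Set.add st.2 key
    if pvGood alert then (st.1 ++ [alert], seen) else (st.1, seen)

def filter_clean_alerts (alerts : List (List (String × String))) : List (List (String × String)) :=
  (alerts.foldl pvStepA (([] : List (List (String × String))), (PySem.Set.empty : PySem.Set String))).1

-- ===== PORT B =====
-- Source B's while-loop: state (out, rest); each round consumes the head and filters the tail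
def pvLoopB (out rest : List (List (String × String))) : List (List (String × String)) :=
  match rest with
  | [] => out
  | head :: rest' =>
    pvLoopB (if pvGood head then out ++ [head] else out)
      (rest'.filter (fun a => pvKey a != pvKey head))
  termination_by rest.length
  decreasing_by
    simpa using Nat.lt_succ_of_le (List.length_filter_le _ _)

def filter_clean_alerts_alt (alerts : List (List (String × String))) : List (List (String × String)) :=
  pvLoopB [] alerts

-- ===== PRECONDITION & SPEC =====
def Spec_filter_clean_alerts (alerts : List (List (String × String))) (out : List (List (String × String))) : Prop := out = filter_clean_alerts_alt alerts
instance (alerts : List (List (String × String))) (out : List (List (String × String))) : Decidable (Spec_filter_clean_alerts alerts out) := by unfold Spec_filter_clean_alerts; infer_instance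

-- ===== CLAIM (what is proved, stated in full; the proofs are below) =====
def Claim_equal_filter_clean_alerts : Prop := ∀ (alerts : List (List (String × String))), Dom_filter_clean_alerts alerts → Spec_filter_clean_alerts alerts (filter_clean_alerts alerts)

-- ===== LEMMAS AND PROOFS =====

-- the deduplicated sublist (first occurrence per pvKey), given the keys already seen
def dedupNF (seen : List String) : List (List (String × String)) → List (List (String × String))
  | [] => []
  | a :: r => if pvKey a ∈ seen then dedupNF seen r else a :: dedupNF (seen ++ [pvKey a]) r

theorem aLoop_eq (r : List (List (String × String))) :
    ∀ (acc : List (List (String × String))) (seen : PySem.Set String),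
      (r.foldl pvStepA (acc, seen)).1 = acc ++ (dedupNF seen r).filter pvGood := by
  induction r with
  | nil => intro acc seen; simp [dedupNF]
  | cons a r ih =>
    intro acc seen
    rw [List.foldl_cons]
    by_cases h : pvKey a ∈ seen
    · have hs : pvStepA (acc, seen) a = (acc, seen) := by simp [pvStepA, h]
      rw [hs, ih, dedupNF, if_pos h]
    · have hadd : PySem.Set.add seen (pvKey a) = seen ++ [pvKey a] :=
        PySem.Set.add_of_not_mem h
      cases hg : pvGood a with
      | true =>
        have hs : pvStepA (acc, seen) a = (acc ++ [a], seen ++ [pvKey a]) := by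
          simp [pvStepA, h, hg]
        rw [hs, ih, dedupNF, if_neg h]
        simp [hg]
      | false =>
        have hs : pvStepA (acc, seen) a = (acc, seen ++ [pvKey a]) := by
          simp [pvStepA, h, hg]
        rw [hs, ih, dedupNF, if_neg h]
        simp [hg]

-- B's elimination loop on the alerts with the already-seen keys removed equals A's characterisation
theorem bLoop_eq (n : Nat) :
    ∀ (r : List (List (String × String))), r.length ≤ n →
    ∀ (seen : List String) (out : List (List (String × String))),
      pvLoopB out (r.filter (fun x => !(seen.contains (pvKey x)))) =
        out ++ (dedupNF seen r).filter pvGood := by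
  induction n with
  | zero =>
    intro r hr seen out
    have : r = [] := List.length_eq_zero_iff.mp (Nat.le_zero.mp hr)
    subst this; simp [pvLoopB, dedupNF]
  | succ n ih =>
    intro r hr seen out
    cases r with
    | nil => simp [pvLoopB, dedupNF]
    | cons a r' =>
      have hr' : r'.length ≤ n := Nat.le_of_succ_le_succ hr
      by_cases h : pvKey a ∈ seen
      · have hc : seen.contains (pvKey a) = true := by
          simpa [List.contains_iff_mem] using h
        have : ((a :: r').filter (fun x => !(seen.contains (pvKey x)))) =
            r'.filter (fun x => !(seen.contains (pvKey x))) := by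
          simp [h]
        rw [this, ih r' hr' seen out, dedupNF, if_pos h]
      · have hc : seen.contains (pvKey a) = false := by
          simp [h]
        have hfa : ((a :: r').filter (fun x => !(seen.contains (pvKey x)))) =
            a :: r'.filter (fun x => !(seen.contains (pvKey x))) := by
          simp [h]
        have hff : ((r'.filter (fun x => !(seen.contains (pvKey x)))).filter
              (fun x => pvKey x != pvKey a)) =
            r'.filter (fun x => !((seen ++ [pvKey a]).contains (pvKey x))) := by
          rw [List.filter_filter]
          apply List.filter_congr
          intro x _
          by_cases hx : pvKey x = pvKey a
          · simp [hx]
          · simp [hx, bne]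
        rw [hfa, pvLoopB, hff, ih r' hr' (seen ++ [pvKey a]) _, dedupNF, if_neg h]
        cases hg : pvGood a with
        | true => simp [hg]
        | false => simp [hg]

-- ===== VERDICT (by name: the statement is the Claim_ definition above) =====
theorem filter_clean_alerts_spec : Claim_equal_filter_clean_alerts := by
  intro alerts _
  show filter_clean_alerts alerts = filter_clean_alerts_alt alerts
  have hb := bLoop_eq alerts.length alerts le_rfl [] []
  simp only [List.contains_nil, Bool.not_false, List.filter_true] at hb
  rw [filter_clean_alerts, filter_clean_alerts_alt, aLoop_eq, hb]
  rfl
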